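-- pv_equiv track=rewrite | github.com/sunoiin/Python | Programmers/Lv1/77485.py | solution
-- ===== SOURCE A (Python) =====
-- def solution(rows, columns, queries):
--     answer = []
--     board = [[i*columns+j+1 for j in range(columns)] for i in range(rows)]
--
--     for a, b, c, d in queries:
--         stack = []
--         x1, y1, x2, y2 = a-1, b-1, c-1, d-1
--
--         for i in range(y1, y2+1):
--             stack.append(board[x1][i])
--             if len(stack) == 1:
--                 continue
--             else:
--                 board[x1][i] = stack[-2]
--         for j in range(x1+1, x2+1):
--             stack.append(board[j][i])
--             board[j][i] = stack[-2]
--         for k in range(y2-1, y1-1, -1):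
--             stack.append(board[j][k])
--             board[j][k] = stack[-2]
--         for l in range(x2-1, x1-1, -1):
--             stack.append(board[l][k])
--             board[l][k] = stack[-2]
--
--         answer.append(min(stack))
--     return answer
-- ===== SOURCE B (Python) =====
-- def solution(rows, columns, queries):
--     board = [[i * columns + j + 1 for j in range(columns)] for i in range(rows)]
--     answer = []
--     for a, b, c, d in queries:
--         x1, y1, x2, y2 = a - 1, b - 1, c - 1, d - 1
--         # clockwise border traversal, each cell once
--         coords = (
--             [(x1, y) for y in range(y1, y2 + 1)]
--             + [(x, y2) for x in range(x1 + 1, x2 + 1)]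
--             + [(x2, y) for y in range(y2 - 1, y1 - 1, -1)]
--             + [(x, y1) for x in range(x2 - 1, x1, -1)]
--         )
--         vals = [board[x][y] for x, y in coords]
--         answer.append(min(vals))
--         # rotate clockwise: each cell receives its predecessor's value
--         for (x, y), v in zip(coords, [vals[-1]] + vals[:-1]):
--             board[x][y] = v
--     return answer
-- ===== Notes on version B (the rewrite author's own statement) =====
-- stated objective: simpler
-- what changed: A rotates the border with four stateful read-modify-write loops threading a growing stack (revisiting the start corner); B collects the clockwise border coordinates once, reads all their values in one pass, appends min(vals), and writes the rotated values back in a single zip pass.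
-- outside the precondition, e.g. on solution(5, 5, [(2, -2, 3, 1), (2, -2, 1, 1)]): A returns [6, 8], B returns [6, 3]; on solution(3, 3, [(0, 1, 2, 2)]): A returns [1], B returns [1]
import Mathlib
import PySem

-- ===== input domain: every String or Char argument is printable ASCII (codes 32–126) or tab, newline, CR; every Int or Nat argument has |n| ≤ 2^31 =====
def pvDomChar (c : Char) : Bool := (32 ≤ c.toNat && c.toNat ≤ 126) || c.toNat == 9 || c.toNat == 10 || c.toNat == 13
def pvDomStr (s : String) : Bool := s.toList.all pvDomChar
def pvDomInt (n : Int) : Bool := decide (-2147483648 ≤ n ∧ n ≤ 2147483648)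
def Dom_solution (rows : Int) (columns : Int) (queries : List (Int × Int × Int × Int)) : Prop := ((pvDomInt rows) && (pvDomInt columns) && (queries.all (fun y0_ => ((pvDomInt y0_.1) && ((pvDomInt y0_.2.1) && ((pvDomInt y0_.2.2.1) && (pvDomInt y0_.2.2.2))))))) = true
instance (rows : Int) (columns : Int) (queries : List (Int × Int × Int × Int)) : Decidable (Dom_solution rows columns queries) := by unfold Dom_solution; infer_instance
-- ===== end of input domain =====

-- B replaces A's four read-modify-write border loops with one read pass over the clockwise
-- border coordinates followed by one rotated write pass (objective: simpler decomposition).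
-- Both programs mutate a local board across queries; only the return value is compared.

-- ===== PORT A =====

-- shared board helpers (both Pythons build and access the board identically);
-- indices are Nat: Pre_ guarantees every access is in range, where Python indexing is exact
def readB (bd : List (List Int)) (x y : Nat) : Int := (bd.getD x []).getD y 0

def writeB (bd : List (List Int)) (x y : Nat) (v : Int) : List (List Int) :=
  bd.set x ((bd.getD x []).set y v)

def initBoard (rows columns : Int) : List (List Int) :=
  (List.range rows.toNat).map (fun i => (List.range columns.toNat).map (fun j => (i : Int) * columns + (j : Int) + 1))

def solution (rows : Int) (columns : Int) (queries : List (Int × Int × Int × Int)) : List Int :=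
  (queries.foldl
    (fun (s : List Int × List (List Int)) (q : Int × Int × Int × Int) =>
      -- Pre_ guarantees 1 ≤ a < c ≤ rows and 1 ≤ b < d ≤ columns, so the Int→Nat
      -- conversions and the Nat ranges below are exact for Python's loops here,
      -- and Python's leftover loop variables i, j, k equal y2, x2, y1 after their loops
      let x1 := (q.1 - 1).toNat
      let y1 := (q.2.1 - 1).toNat
      let x2 := (q.2.2.1 - 1).toNat
      let y2 := (q.2.2.2 - 1).toNat
      let s1 := (List.range' y1 (y2 + 1 - y1)).foldl
        (fun (t : List Int × List (List Int)) i =>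
          let st := t.1 ++ [readB t.2 x1 i]
          if st.length = 1 then (st, t.2)
          else (st, writeB t.2 x1 i (PySem.List.pyGetD st (-2) 0))) ([], s.2)
      let s2 := (List.range' (x1 + 1) (x2 - x1)).foldl
        (fun t j =>
          let st := t.1 ++ [readB t.2 j y2]
          (st, writeB t.2 j y2 (PySem.List.pyGetD st (-2) 0))) s1
      let s3 := ((List.range' y1 (y2 - y1)).reverse).foldl
        (fun t k =>
          let st := t.1 ++ [readB t.2 x2 k]
          (st, writeB t.2 x2 k (PySem.List.pyGetD st (-2) 0))) s2
      let s4 := ((List.range' x1 (x2 - x1)).reverse).foldl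
        (fun t l =>
          let st := t.1 ++ [readB t.2 l y1]
          (st, writeB t.2 l y1 (PySem.List.pyGetD st (-2) 0))) s3
      (s.1 ++ [(PySem.List.min? s4.1 (fun v => v)).getD 0], s4.2))
    ([], initBoard rows columns)).1

-- ===== PORT B =====

-- the border cells of the rectangle in clockwise order, each cell once
def borderCoords (x1 y1 x2 y2 : Nat) : List (Nat × Nat) :=
  (List.range' y1 (y2 + 1 - y1)).map (fun y => (x1, y))
  ++ (List.range' (x1 + 1) (x2 - x1)).map (fun x => (x, y2))
  ++ ((List.range' y1 (y2 - y1)).reverse).map (fun y => (x2, y))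
  ++ ((List.range' (x1 + 1) (x2 - 1 - x1)).reverse).map (fun x => (x, y1))

def solution_alt (rows : Int) (columns : Int) (queries : List (Int × Int × Int × Int)) : List Int :=
  (queries.foldl
    (fun (s : List Int × List (List Int)) (q : Int × Int × Int × Int) =>
      let x1 := (q.1 - 1).toNat
      let y1 := (q.2.1 - 1).toNat
      let x2 := (q.2.2.1 - 1).toNat
      let y2 := (q.2.2.2 - 1).toNat
      let coords := borderCoords x1 y1 x2 y2
      let vals := coords.map (fun p => readB s.2 p.1 p.2)
      -- zip(coords, [vals[-1]] + vals[:-1]) write pass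
      let bd := (coords.zip (vals.getLastD 0 :: vals.dropLast)).foldl
        (fun b pv => writeB b pv.1.1 pv.1.2 pv.2) s.2
      (s.1 ++ [(PySem.List.min? vals (fun v => v)).getD 0], bd))
    ([], initBoard rows columns)).1

-- ===== PRECONDITION & SPEC =====

-- Pre_ restricts to the problem's natural domain: every query is a proper in-bounds
-- sub-rectangle (1 ≤ a < c ≤ rows, 1 ≤ b < d ≤ columns).  Outside it Python A raises
-- (IndexError / UnboundLocalError / ValueError on the first bad query) or returns values
-- produced by negative-index wraparound and by loop variables left over from earlier queries.
def Pre_solution (rows : Int) (columns : Int) (queries : List (Int × Int × Int × Int)) : Prop :=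
  ∀ q ∈ queries, 1 ≤ q.1 ∧ q.1 < q.2.2.1 ∧ q.2.2.1 ≤ rows ∧
    1 ≤ q.2.1 ∧ q.2.1 < q.2.2.2 ∧ q.2.2.2 ≤ columns

instance (rows : Int) (columns : Int) (queries : List (Int × Int × Int × Int)) : Decidable (Pre_solution rows columns queries) := by unfold Pre_solution; infer_instance

def pvWitness_solution : Int × Int × (List (Int × Int × Int × Int)) := (6, 6, [(2, 2, 5, 4), (3, 3, 6, 6)])

def Spec_solution (rows : Int) (columns : Int) (queries : List (Int × Int × Int × Int)) (out : List Int) : Prop := out = solution_alt rows columns queries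
instance (rows : Int) (columns : Int) (queries : List (Int × Int × Int × Int)) (out : List Int) : Decidable (Spec_solution rows columns queries out) := by unfold Spec_solution; infer_instance

-- ===== CLAIM (what is proved, stated in full; the proofs are below) =====
def Claim_equal_solution : Prop := ∀ (rows : Int) (columns : Int) (queries : List (Int × Int × Int × Int)), Dom_solution rows columns queries → Pre_solution rows columns queries → Spec_solution rows columns queries (solution rows columns queries)

-- ===== LEMMAS AND PROOFS =====

-- the generic read-then-write step both programs' border passes reduce to
def stepRW (s : List Int × List (List Int)) (p : Nat × Nat) : List Int × List (List Int) :=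
  (s.1 ++ [readB s.2 p.1 p.2], writeB s.2 p.1 p.2 (s.1.getLastD 0))

def writeAll (bd : List (List Int)) (l : List ((Nat × Nat) × Int)) : List (List Int) :=
  l.foldl (fun b pv => writeB b pv.1.1 pv.1.2 pv.2) bd

-- A's stack[-2] after the append is the previous top of the stack
theorem pyGetD_snoc_neg2 (st : List Int) (v : Int) (h : st ≠ []) :
    PySem.List.pyGetD (st ++ [v]) (-2) 0 = st.getLastD 0 := by
  obtain ⟨ys, y, rfl⟩ := (List.eq_nil_or_concat st).resolve_left h
  simp only [List.concat_eq_append]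
  have hlen : 2 ≤ (ys ++ [y] ++ [v]).length := by simp
  rw [PySem.List.pyGetD_neg_ofNat _ 2 0 (by omega) hlen]
  simp

theorem readB_writeB_ne (bd : List (List Int)) (p p' : Nat × Nat) (v : Int) (h : p ≠ p') :
    readB (writeB bd p.1 p.2 v) p'.1 p'.2 = readB bd p'.1 p'.2 := by
  obtain ⟨x, y⟩ := p; obtain ⟨x', y'⟩ := p'
  simp only [readB, writeB, List.getD_eq_getElem?_getD]
  by_cases hx : x = x'
  · subst hx
    have hy : y ≠ y' := by intro hy; exact h (by simp [hy])
    by_cases hlt : x < bd.length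
    · rw [List.getElem?_set_self hlt]
      simp [List.getElem?_set_ne hy]
    · rw [List.set_eq_of_length_le (by omega)]
  · rw [List.getElem?_set_ne hx]

theorem writeB_comm (bd : List (List Int)) (p p' : Nat × Nat) (v v' : Int) (h : p ≠ p') :
    writeB (writeB bd p.1 p.2 v) p'.1 p'.2 v' = writeB (writeB bd p'.1 p'.2 v') p.1 p.2 v := by
  obtain ⟨x, y⟩ := p; obtain ⟨x', y'⟩ := p'
  simp only [writeB, List.getD_eq_getElem?_getD]
  by_cases hx : x = x'
  · subst hx
    have hy : y ≠ y' := by intro hy; exact h (by simp [hy])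
    by_cases hlt : x < bd.length
    · rw [List.getElem?_set_self hlt, List.getElem?_set_self hlt]
      simp only [Option.getD_some, List.set_set]
      rw [List.set_comm _ _ hy]
    · have hob : ∀ (r : List Int), bd.set x r = bd :=
        fun r => List.set_eq_of_length_le (by omega)
      simp [hob]
  · rw [List.getElem?_set_ne hx, List.getElem?_set_ne (Ne.symm hx), List.set_comm _ _ hx]

theorem writeAll_snoc_comm (l : List ((Nat × Nat) × Int)) :
    ∀ (bd : List (List Int)) (p : Nat × Nat) (v : Int), (∀ pv ∈ l, pv.1 ≠ p) →
    writeAll bd (l ++ [(p, v)]) = writeAll bd ((p, v) :: l) := by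
  induction l with
  | nil => intro bd p v _; rfl
  | cons pv l ih =>
    intro bd p v h
    have h1 : pv.1 ≠ p := h pv (List.mem_cons_self ..)
    have e1 : writeAll bd ((pv :: l) ++ [(p, v)]) = writeAll (writeB bd pv.1.1 pv.1.2 pv.2) (l ++ [(p, v)]) := rfl
    have e2 : writeAll bd ((p, v) :: pv :: l) = writeAll (writeB (writeB bd p.1 p.2 v) pv.1.1 pv.1.2 pv.2) l := rfl
    rw [e1, e2, ih _ p v (fun x hx => h x (List.mem_cons_of_mem _ hx))]
    have e3 : writeAll (writeB bd pv.1.1 pv.1.2 pv.2) ((p, v) :: l) = writeAll (writeB (writeB bd pv.1.1 pv.1.2 pv.2) p.1 p.2 v) l := rfl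
    rw [e3, writeB_comm _ _ _ _ _ h1]

theorem stepRW_stack_ne (l : List (Nat × Nat)) :
    ∀ s : List Int × List (List Int), s.1 ≠ [] → (l.foldl stepRW s).1 ≠ [] := by
  induction l with
  | nil => exact fun s h => h
  | cons p l ih => intro s h; exact ih _ (by simp [stepRW])

theorem foldl_step_eq (f : Nat → Nat × Nat)
    (step : List Int × List (List Int) → Nat → List Int × List (List Int))
    (hstep : ∀ s i, s.1 ≠ [] → step s i = stepRW s (f i)) :
    ∀ (l : List Nat) (s : List Int × List (List Int)), s.1 ≠ [] →
      l.foldl step s = (l.map f).foldl stepRW s := by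
  intro l
  induction l with
  | nil => intro s _; rfl
  | cons i l ih =>
    intro s h
    simp only [List.foldl_cons, List.map_cons, hstep s i h]
    exact ih _ (by simp [stepRW])

theorem foldRW_eq (qs : List (Nat × Nat)) :
    ∀ (st : List Int) (bd : List (List Int)), qs.Nodup →
      qs.foldl stepRW (st, bd) =
        (st ++ qs.map (fun p => readB bd p.1 p.2),
         writeAll bd (qs.zip (st.getLastD 0 :: (qs.map (fun p => readB bd p.1 p.2)).dropLast))) := by
  induction qs with
  | nil => intro st bd _; simp [writeAll]
  | cons q qs ih =>
    intro st bd hnd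
    have hq : q ∉ qs := (List.nodup_cons.mp hnd).1
    have hnd' : qs.Nodup := (List.nodup_cons.mp hnd).2
    have hread : ∀ p ∈ qs, readB (writeB bd q.1 q.2 (st.getLastD 0)) p.1 p.2 = readB bd p.1 p.2 := by
      intro p hp
      exact readB_writeB_ne bd q p _ (fun he => hq (he ▸ hp))
    simp only [List.foldl_cons]
    rw [show stepRW (st, bd) q = (st ++ [readB bd q.1 q.2], writeB bd q.1 q.2 (st.getLastD 0)) from rfl]
    rw [ih _ _ hnd']
    rw [List.map_congr_left hread]
    rw [Prod.mk.injEq]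
    refine ⟨by simp, ?_⟩
    rw [List.getLastD_concat]
    rcases qs with _ | ⟨q', qs'⟩
    · simp [writeAll]
    · simp only [writeAll, List.map_cons, List.dropLast_cons₂, List.zip_cons_cons, List.foldl_cons]


-- path pieces
def pathRest (x1 y1 x2 y2 : Nat) : List (Nat × Nat) :=
  (List.range' (y1 + 1) (y2 - y1)).map (fun y => (x1, y))
  ++ (List.range' (x1 + 1) (x2 - x1)).map (fun x => (x, y2))
  ++ ((List.range' y1 (y2 - y1)).reverse).map (fun y => (x2, y))
  ++ ((List.range' (x1 + 1) (x2 - 1 - x1)).reverse).map (fun x => (x, y1))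

theorem path_nodup (x1 y1 x2 y2 : Nat) (h1 : x1 < x2) (h2 : y1 < y2) :
    ((x1, y1) :: pathRest x1 y1 x2 y2).Nodup := by
  have inj1 : Function.Injective (fun y : Nat => ((x1, y) : Nat × Nat)) := fun a b h => by simpa using h
  have inj2 : Function.Injective (fun x : Nat => ((x, y2) : Nat × Nat)) := fun a b h => by simpa using h
  have inj3 : Function.Injective (fun y : Nat => ((x2, y) : Nat × Nat)) := fun a b h => by simpa using h
  have inj4 : Function.Injective (fun x : Nat => ((x, y1) : Nat × Nat)) := fun a b h => by simpa using h
  have n1 : ((List.range' (y1 + 1) (y2 - y1)).map (fun y => ((x1, y) : Nat × Nat))).Nodup :=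
    (List.nodup_range' 1).map inj1
  have n2 : ((List.range' (x1 + 1) (x2 - x1)).map (fun x => ((x, y2) : Nat × Nat))).Nodup :=
    (List.nodup_range' 1).map inj2
  have n3 : (((List.range' y1 (y2 - y1)).reverse).map (fun y => ((x2, y) : Nat × Nat))).Nodup :=
    (List.nodup_reverse.mpr (List.nodup_range' 1)).map inj3
  have n4 : (((List.range' (x1 + 1) (x2 - 1 - x1)).reverse).map (fun x => ((x, y1) : Nat × Nat))).Nodup :=
    (List.nodup_reverse.mpr (List.nodup_range' 1)).map inj4
  have dj : ∀ {f g : Nat → Nat × Nat} {l1 l2 : List Nat},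
      (∀ a ∈ l1, ∀ b ∈ l2, f a ≠ g b) → List.Disjoint (l1.map f) (l2.map g) := by
    intro f g l1 l2 h p hp hq
    obtain ⟨a, ha, rfl⟩ := List.mem_map.mp hp
    obtain ⟨b, hb, hba⟩ := List.mem_map.mp hq
    exact h a ha b hb hba.symm
  have d34 : List.Disjoint (((List.range' y1 (y2 - y1)).reverse).map (fun y => ((x2, y) : Nat × Nat)))
      (((List.range' (x1 + 1) (x2 - 1 - x1)).reverse).map (fun x => ((x, y1) : Nat × Nat))) := by
    apply dj; intro a ha b hb
    rw [List.mem_reverse, List.mem_range'] at ha hb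
    simp only [ne_eq, Prod.mk.injEq, not_and]; omega
  have d23 : List.Disjoint ((List.range' (x1 + 1) (x2 - x1)).map (fun x => ((x, y2) : Nat × Nat)))
      (((List.range' y1 (y2 - y1)).reverse).map (fun y => ((x2, y) : Nat × Nat))) := by
    apply dj; intro a ha b hb
    rw [List.mem_range'] at ha; rw [List.mem_reverse, List.mem_range'] at hb
    simp only [ne_eq, Prod.mk.injEq, not_and]; omega
  have d24 : List.Disjoint ((List.range' (x1 + 1) (x2 - x1)).map (fun x => ((x, y2) : Nat × Nat)))
      (((List.range' (x1 + 1) (x2 - 1 - x1)).reverse).map (fun x => ((x, y1) : Nat × Nat))) := by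
    apply dj; intro a ha b hb
    rw [List.mem_range'] at ha; rw [List.mem_reverse, List.mem_range'] at hb
    simp only [ne_eq, Prod.mk.injEq, not_and]; omega
  have d12 : List.Disjoint ((List.range' (y1 + 1) (y2 - y1)).map (fun y => ((x1, y) : Nat × Nat)))
      ((List.range' (x1 + 1) (x2 - x1)).map (fun x => ((x, y2) : Nat × Nat))) := by
    apply dj; intro a ha b hb
    rw [List.mem_range'] at ha hb
    simp only [ne_eq, Prod.mk.injEq, not_and]; omega
  have d13 : List.Disjoint ((List.range' (y1 + 1) (y2 - y1)).map (fun y => ((x1, y) : Nat × Nat)))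
      (((List.range' y1 (y2 - y1)).reverse).map (fun y => ((x2, y) : Nat × Nat))) := by
    apply dj; intro a ha b hb
    rw [List.mem_range'] at ha; rw [List.mem_reverse, List.mem_range'] at hb
    simp only [ne_eq, Prod.mk.injEq, not_and]; omega
  have d14 : List.Disjoint ((List.range' (y1 + 1) (y2 - y1)).map (fun y => ((x1, y) : Nat × Nat)))
      (((List.range' (x1 + 1) (x2 - 1 - x1)).reverse).map (fun x => ((x, y1) : Nat × Nat))) := by
    apply dj; intro a ha b hb
    rw [List.mem_range'] at ha; rw [List.mem_reverse, List.mem_range'] at hb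
    simp only [ne_eq, Prod.mk.injEq, not_and]; omega
  refine List.nodup_cons.mpr ⟨?_, ?_⟩
  · unfold pathRest
    simp only [List.mem_append, List.mem_map, List.mem_reverse, List.mem_range',
      Prod.mk.injEq, not_or, not_exists, not_and]
    repeat' apply And.intro
    all_goals (intro a ha; obtain ⟨i, hi, rfl⟩ := ha; intros; omega)
  · unfold pathRest
    refine List.Nodup.append (List.Nodup.append (n1.append n2 d12) n3 ?_) n4 ?_
    · exact (List.disjoint_append_left).mpr ⟨d13, d23⟩
    · exact (List.disjoint_append_left).mpr ⟨(List.disjoint_append_left).mpr ⟨d14, d24⟩, d34⟩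

theorem foldl_min_le (l : List Int) : ∀ x : Int, l.foldl min x ≤ x := by
  induction l with
  | nil => intro x; simp
  | cons a l ih =>
    intro x
    calc (a :: l).foldl min x = l.foldl min (min x a) := by simp
    _ ≤ min x a := ih _
    _ ≤ x := min_le_left _ _

theorem min_snoc (v0 : Int) (mr : List Int) :
    PySem.List.min? (v0 :: (mr ++ [v0])) (fun v => v)
      = PySem.List.min? (v0 :: mr) (fun v => v) := by
  rw [PySem.List.min?_id_cons, PySem.List.min?_id_cons]
  rw [List.foldl_append]
  simp only [List.foldl_cons, List.foldl_nil]
  rw [min_eq_left (foldl_min_le mr v0)]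

theorem writeAll_rotate (ps : List (Nat × Nat)) (vs : List Int) (c0 : Nat × Nat)
    (bd : List (List Int)) (hlen : vs.length = ps.length + 1) (hc : c0 ∉ ps) :
    writeAll bd ((ps ++ [c0]).zip vs)
      = writeAll bd ((c0 :: ps).zip (vs.getLastD 0 :: vs.dropLast)) := by
  have hvs : vs ≠ [] := by intro h; subst h; simp at hlen
  obtain ⟨ws, w, rfl⟩ := (List.eq_nil_or_concat vs).resolve_left hvs
  simp only [List.concat_eq_append] at hlen ⊢
  have hlen' : ps.length = ws.length := by simp at hlen; omega
  rw [List.zip_append hlen', List.dropLast_concat, List.getLastD_concat]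
  have hkeys : ∀ pv ∈ ps.zip ws, pv.1 ≠ c0 := by
    intro pv hpv he
    exact hc (he ▸ (List.of_mem_zip hpv).1)
  have hz : ([c0].zip [w]) = [(c0, w)] := rfl
  rw [hz, writeAll_snoc_comm _ _ _ _ hkeys]
  rfl

theorem border_cons (x1 y1 x2 y2 : Nat) (h2 : y1 < y2) :
    borderCoords x1 y1 x2 y2 = (x1, y1) :: pathRest x1 y1 x2 y2 := by
  unfold borderCoords pathRest
  rw [show y2 + 1 - y1 = (y2 - y1) + 1 by omega, List.range'_succ]
  simp

theorem left_split (x1 x2 : Nat) (h1 : x1 < x2) :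
    (List.range' x1 (x2 - x1)).reverse
      = (List.range' (x1 + 1) (x2 - 1 - x1)).reverse ++ [x1] := by
  rw [show x2 - x1 = (x2 - 1 - x1) + 1 by omega, List.range'_succ, List.reverse_cons]

theorem foldl_eq_on {α β : Type} (f g : α → β → α) (l : List β) (P : β → Prop)
    (hl : ∀ b ∈ l, P b) (h : ∀ a b, P b → f a b = g a b) :
    ∀ a, l.foldl f a = l.foldl g a := by
  induction l with
  | nil => intro a; rfl
  | cons b l ih =>
    intro a
    rw [List.foldl_cons, List.foldl_cons, h a b (hl b (List.mem_cons_self ..))]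
    exact ih (fun x hx => hl x (List.mem_cons_of_mem _ hx)) _

theorem query_eq (ans : List Int) (bd : List (List Int)) (x1 y1 x2 y2 : Nat)
    (h1 : x1 < x2) (h2 : y1 < y2) :
    (let s1 := (List.range' y1 (y2 + 1 - y1)).foldl
        (fun (t : List Int × List (List Int)) i =>
          let st := t.1 ++ [readB t.2 x1 i]
          if st.length = 1 then (st, t.2)
          else (st, writeB t.2 x1 i (PySem.List.pyGetD st (-2) 0))) ([], bd)
     let s2 := (List.range' (x1 + 1) (x2 - x1)).foldl
        (fun t j =>
          let st := t.1 ++ [readB t.2 j y2]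
          (st, writeB t.2 j y2 (PySem.List.pyGetD st (-2) 0))) s1
     let s3 := ((List.range' y1 (y2 - y1)).reverse).foldl
        (fun t k =>
          let st := t.1 ++ [readB t.2 x2 k]
          (st, writeB t.2 x2 k (PySem.List.pyGetD st (-2) 0))) s2
     let s4 := ((List.range' x1 (x2 - x1)).reverse).foldl
        (fun t l =>
          let st := t.1 ++ [readB t.2 l y1]
          (st, writeB t.2 l y1 (PySem.List.pyGetD st (-2) 0))) s3
     (ans ++ [(PySem.List.min? s4.1 (fun v => v)).getD 0], s4.2))
    = (let coords := borderCoords x1 y1 x2 y2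
       let vals := coords.map (fun p => readB bd p.1 p.2)
       let bd2 := (coords.zip (vals.getLastD 0 :: vals.dropLast)).foldl
          (fun b pv => writeB b pv.1.1 pv.1.2 pv.2) bd
       (ans ++ [(PySem.List.min? vals (fun v => v)).getD 0], bd2)) := by
  dsimp only
  have htop : List.range' y1 (y2 + 1 - y1) = y1 :: List.range' (y1 + 1) (y2 - y1) := by
    rw [show y2 + 1 - y1 = (y2 - y1) + 1 by omega, List.range'_succ]
  have hstep1 : ∀ (s : List Int × List (List Int)) (i : Nat), s.1 ≠ [] →
      (fun (t : List Int × List (List Int)) i =>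
        let st := t.1 ++ [readB t.2 x1 i]
        if st.length = 1 then (st, t.2)
        else (st, writeB t.2 x1 i (PySem.List.pyGetD st (-2) 0))) s i
      = stepRW s ((fun i => ((x1, i) : Nat × Nat)) i) := by
    intro s i h
    dsimp only
    rw [if_neg (by simp [h])]
    rw [pyGetD_snoc_neg2 _ _ h]
    rfl
  have hstep2 : ∀ (s : List Int × List (List Int)) (j : Nat), s.1 ≠ [] →
      (fun (t : List Int × List (List Int)) j =>
        let st := t.1 ++ [readB t.2 j y2]
        (st, writeB t.2 j y2 (PySem.List.pyGetD st (-2) 0))) s j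
      = stepRW s ((fun j => ((j, y2) : Nat × Nat)) j) := by
    intro s j h
    dsimp only
    rw [pyGetD_snoc_neg2 _ _ h]
    rfl
  have hstep3 : ∀ (s : List Int × List (List Int)) (k : Nat), s.1 ≠ [] →
      (fun (t : List Int × List (List Int)) k =>
        let st := t.1 ++ [readB t.2 x2 k]
        (st, writeB t.2 x2 k (PySem.List.pyGetD st (-2) 0))) s k
      = stepRW s ((fun k => ((x2, k) : Nat × Nat)) k) := by
    intro s k h
    dsimp only
    rw [pyGetD_snoc_neg2 _ _ h]
    rfl
  have hstep4 : ∀ (s : List Int × List (List Int)) (l : Nat), s.1 ≠ [] →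
      (fun (t : List Int × List (List Int)) l =>
        let st := t.1 ++ [readB t.2 l y1]
        (st, writeB t.2 l y1 (PySem.List.pyGetD st (-2) 0))) s l
      = stepRW s ((fun l => ((l, y1) : Nat × Nat)) l) := by
    intro s l h
    dsimp only
    rw [pyGetD_snoc_neg2 _ _ h]
    rfl
  have e1 : (List.range' y1 (y2 + 1 - y1)).foldl
        (fun (t : List Int × List (List Int)) i =>
          let st := t.1 ++ [readB t.2 x1 i]
          if st.length = 1 then (st, t.2)
          else (st, writeB t.2 x1 i (PySem.List.pyGetD st (-2) 0))) ([], bd)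
      = ((List.range' (y1 + 1) (y2 - y1)).map (fun i => ((x1, i) : Nat × Nat))).foldl stepRW
          ([readB bd x1 y1], bd) := by
    rw [htop, List.foldl_cons]
    exact foldl_step_eq _ _ hstep1 _ _ (by simp)
  have e2 : ∀ s : List Int × List (List Int), s.1 ≠ [] →
      (List.range' (x1 + 1) (x2 - x1)).foldl
        (fun t j =>
          let st := t.1 ++ [readB t.2 j y2]
          (st, writeB t.2 j y2 (PySem.List.pyGetD st (-2) 0))) s
      = ((List.range' (x1 + 1) (x2 - x1)).map (fun j => ((j, y2) : Nat × Nat))).foldl stepRW s :=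
    fun s hs => foldl_step_eq _ _ hstep2 _ s hs
  have e3 : ∀ s : List Int × List (List Int), s.1 ≠ [] →
      ((List.range' y1 (y2 - y1)).reverse).foldl
        (fun t k =>
          let st := t.1 ++ [readB t.2 x2 k]
          (st, writeB t.2 x2 k (PySem.List.pyGetD st (-2) 0))) s
      = (((List.range' y1 (y2 - y1)).reverse).map (fun k => ((x2, k) : Nat × Nat))).foldl stepRW s :=
    fun s hs => foldl_step_eq _ _ hstep3 _ s hs
  have e4 : ∀ s : List Int × List (List Int), s.1 ≠ [] →
      ((List.range' x1 (x2 - x1)).reverse).foldl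
        (fun t l =>
          let st := t.1 ++ [readB t.2 l y1]
          (st, writeB t.2 l y1 (PySem.List.pyGetD st (-2) 0))) s
      = (((List.range' x1 (x2 - x1)).reverse).map (fun l => ((l, y1) : Nat × Nat))).foldl stepRW s :=
    fun s hs => foldl_step_eq _ _ hstep4 _ s hs
  rw [e1]
  rw [e2 _ (stepRW_stack_ne _ _ (by simp))]
  rw [e3 _ (stepRW_stack_ne _ _ (stepRW_stack_ne _ _ (by simp)))]
  rw [e4 _ (stepRW_stack_ne _ _ (stepRW_stack_ne _ _ (stepRW_stack_ne _ _ (by simp))))]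
  rw [← List.foldl_append, ← List.foldl_append, ← List.foldl_append]
  have hcells : List.map (fun i => ((x1, i) : Nat × Nat)) (List.range' (y1 + 1) (y2 - y1)) ++
        (List.map (fun j => ((j, y2) : Nat × Nat)) (List.range' (x1 + 1) (x2 - x1)) ++
          (List.map (fun k => ((x2, k) : Nat × Nat)) (List.range' y1 (y2 - y1)).reverse ++
            List.map (fun l => ((l, y1) : Nat × Nat)) (List.range' x1 (x2 - x1)).reverse))
      = pathRest x1 y1 x2 y2 ++ [((x1, y1) : Nat × Nat)] := by
    unfold pathRest
    rw [left_split x1 x2 h1, List.map_append]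
    simp [List.append_assoc]
  rw [hcells]
  have hnd : (pathRest x1 y1 x2 y2 ++ [((x1, y1) : Nat × Nat)]).Nodup := by
    have h := path_nodup x1 y1 x2 y2 h1 h2
    have h' : (pathRest x1 y1 x2 y2 ++ (x1, y1) :: []).Nodup :=
      List.nodup_middle.mpr (by simpa using h)
    simpa using h'
  have hnm : ((x1, y1) : Nat × Nat) ∉ pathRest x1 y1 x2 y2 :=
    (List.nodup_cons.mp (path_nodup x1 y1 x2 y2 h1 h2)).1
  rw [foldRW_eq _ _ _ hnd]
  rw [border_cons x1 y1 x2 y2 h2]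
  simp only [List.map_append, List.map_cons, List.map_nil, List.singleton_append,
    List.dropLast_concat]
  have hgl : ([readB bd x1 y1] : List Int).getLastD 0 = readB bd x1 y1 := rfl
  rw [hgl]
  have hw : ∀ l, List.foldl (fun (b : List (List Int)) (pv : (Nat × Nat) × Int) =>
      writeB b pv.1.1 pv.1.2 pv.2) bd l = writeAll bd l := fun l => rfl
  rw [hw]
  rw [Prod.mk.injEq]
  constructor
  · rw [min_snoc]
  · exact writeAll_rotate _ _ _ _ (by simp) hnm

-- ===== VERDICT (by name: the statement is the Claim_ definition above) =====
theorem solution_spec : Claim_equal_solution := by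
  unfold Claim_equal_solution
  intro rows columns queries _ hpre
  unfold Spec_solution solution solution_alt
  refine congrArg Prod.fst (foldl_eq_on _ _ queries
    (fun q => 1 ≤ q.1 ∧ q.1 < q.2.2.1 ∧ q.2.2.1 ≤ rows ∧
      1 ≤ q.2.1 ∧ q.2.1 < q.2.2.2 ∧ q.2.2.2 ≤ columns) hpre ?_ _)
  intro s q hq
  obtain ⟨ha, hac, hcr, hb, hbd, hdc⟩ := hq
  exact query_eq s.1 s.2 _ _ _ _ (by omega) (by omega)
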